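-- pv_equiv track=rewrite | github.com/Its-MatriX/DBot-Selfbot | Commands/colors.py | gradient_vertical
-- ===== SOURCE A (Python) =====
-- def foreground_sequence(color):
--         return '\033[38;5;%dm' % color
--
-- def background_sequence(color):
--     return '\033[48;5;%dm' % color
--
-- def get_color(color, mode='fg'):
--     if mode == 'bg':
--         color = background_sequence(color)
--     elif mode == 'fg':
--         color = foreground_sequence(color)
--     else:
--         return None
--
--     return color
--
-- colors_main = [128, 129, 135, 141, 147, 153, 159, 153, 147, 141, 135, 129]
--
-- def gradient_vertical(string, colors = colors_main):
--     resp = ''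
--     color_index = 0
--     reverse_mode = False
--
--     string = string.split('\n')
--
--     for line in string:
--         if reverse_mode == False:
--             color_index += 1
--         else:
--             color_index -= 1
--
--         if color_index == len(colors):
--             reverse_mode = True
--             color_index = len(colors) - 1
--
--         if color_index == -1:
--             reverse_mode = False
--             color_index = 0
--
--         resp += get_color(colors[color_index]) + line + '\n'
--
--     return resp
-- ===== SOURCE B (Python) =====
-- def foreground_sequence(color):
--         return '\033[38;5;%dm' % color
--
-- def background_sequence(color):
--     return '\033[48;5;%dm' % color
--
-- def get_color(color, mode='fg'):
--     if mode == 'bg':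
--         color = background_sequence(color)
--     elif mode == 'fg':
--         color = foreground_sequence(color)
--     else:
--         return None
--
--     return color
--
-- colors_main = [128, 129, 135, 141, 147, 153, 159, 153, 147, 141, 135, 129]
--
-- def gradient_vertical(string, colors = colors_main):
--     # Closed-form ping-pong: line i uses index max(0, min(j+1, n-1, 2n-2-j)),
--     # j = i mod 2n -- no reverse_mode state machine.
--     n = len(colors)
--     pieces = []
--     for i, line in enumerate(string.split('\n')):
--         j = i % (2 * n)
--         idx = max(0, min(j + 1, n - 1, 2 * n - 2 - j))
--         pieces.append(get_color(colors[idx]) + line + '\n')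
--     return ''.join(pieces)
-- ===== Notes on version B (the rewrite author's own statement) =====
-- stated objective: alternative
-- what changed: Replaces A's incrementing/flipping reverse_mode state machine with a stateless per-line closed-form ping-pong index idx = max(0, min(j+1, n-1, 2n-2-j)) with j = i mod 2n, joining the pieces at the end.
import Mathlib
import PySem

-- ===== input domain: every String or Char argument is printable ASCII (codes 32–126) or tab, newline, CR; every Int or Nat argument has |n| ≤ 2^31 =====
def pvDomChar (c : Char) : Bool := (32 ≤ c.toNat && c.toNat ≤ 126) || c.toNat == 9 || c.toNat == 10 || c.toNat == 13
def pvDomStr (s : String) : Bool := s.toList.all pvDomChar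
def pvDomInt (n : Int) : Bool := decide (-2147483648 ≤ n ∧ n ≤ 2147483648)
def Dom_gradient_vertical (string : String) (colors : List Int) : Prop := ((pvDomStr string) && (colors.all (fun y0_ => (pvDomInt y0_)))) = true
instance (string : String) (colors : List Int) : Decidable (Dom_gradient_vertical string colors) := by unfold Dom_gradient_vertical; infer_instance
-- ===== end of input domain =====

-- B replaces A's incrementing/flipping reverse_mode state machine by a stateless closed-form
-- ping-pong index per line (objective: alternative decomposition; same cost).

-- ===== PORT A =====
def foreground_sequence (color : Int) : String := "\x1b[38;5;" ++ PySem.Int.toStr color ++ "m"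

def background_sequence (color : Int) : String := "\x1b[48;5;" ++ PySem.Int.toStr color ++ "m"

def get_color (color : Int) (mode : String) : Option String :=
  if mode = "bg" then some (background_sequence color)
  else if mode = "fg" then some (foreground_sequence color)
  else none

-- the for-loop over the split lines, state (resp, color_index, reverse_mode)
def gradient_vertical_loop (colors : List Int) : List String → String → Int → Bool → String
  | [], resp, _, _ => resp
  | line :: rest, resp, colorIndex, reverseMode =>
      let ci1 : Int := if reverseMode = false then colorIndex + 1 else colorIndex - 1
      let st2 : Int × Bool :=
        if ci1 = (colors.length : Int) then ((colors.length : Int) - 1, true) else (ci1, reverseMode)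
      let st3 : Int × Bool := if st2.1 = -1 then ((0 : Int), false) else st2
      -- colors[color_index]: IndexError (= none) only when colors = [], excluded by Pre_;
      -- get_color is always `some` for mode "fg"
      gradient_vertical_loop colors rest
        (resp ++ ((get_color ((PySem.List.pyGet? colors st3.1).getD 0) "fg").getD "") ++ line ++ "\n")
        st3.1 st3.2

def gradient_vertical (string : String) (colors : List Int) : String :=
  -- string.split('\n'): split? is none only for an empty separator, never here
  gradient_vertical_loop colors ((PySem.Str.split? string "\n").getD []) "" 0 false

-- ===== PORT B =====
-- one piece per line: idx = max(0, min(j+1, n-1, 2n-2-j)), j = i % (2n)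
-- (for n ≥ 1 Python's i % (2*n) on the Nat i is Nat mod; n = 0 raises, excluded by Pre_)
def gv_piece (colors : List Int) (i : Nat) (line : String) : String :=
  let n : Int := (colors.length : Int)
  let j : Int := ((i % (2 * colors.length) : Nat) : Int)
  let idx : Int := max 0 (min (j + 1) (min (n - 1) (2 * n - 2 - j)))
  ((get_color ((PySem.List.pyGet? colors idx).getD 0) "fg").getD "") ++ line ++ "\n"

-- ''.join of the enumerated pieces
def gradient_vertical_alt_go (colors : List Int) : Nat → List String → String
  | _, [] => ""
  | i, line :: rest => gv_piece colors i line ++ gradient_vertical_alt_go colors (i + 1) rest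

def gradient_vertical_alt (string : String) (colors : List Int) : String :=
  gradient_vertical_alt_go colors 0 ((PySem.Str.split? string "\n").getD [])

-- ===== PRECONDITION & SPEC =====
-- Pre_ excludes only colors = [], where A raises IndexError (colors[1]); B raises there too.
def Pre_gradient_vertical (string : String) (colors : List Int) : Prop := colors ≠ []
instance (string : String) (colors : List Int) : Decidable (Pre_gradient_vertical string colors) := by
  unfold Pre_gradient_vertical; infer_instance

def pvWitness_gradient_vertical : String × List Int := ("hi\nthere", [128, 129, 135])

def Spec_gradient_vertical (string : String) (colors : List Int) (out : String) : Prop := out = gradient_vertical_alt string colors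
instance (string : String) (colors : List Int) (out : String) : Decidable (Spec_gradient_vertical string colors out) := by unfold Spec_gradient_vertical; infer_instance

-- ===== CLAIM (what is proved, stated in full; the proofs are below) =====
def Claim_equal_gradient_vertical : Prop := ∀ (string : String) (colors : List Int), Dom_gradient_vertical string colors → Pre_gradient_vertical string colors → Spec_gradient_vertical string colors (gradient_vertical string colors)

-- ===== LEMMAS AND PROOFS =====

-- closed form of A's state after i iterations (N = colors.length ≥ 1)
def gvState (N i : Nat) : Int × Bool :=
  let j := i % (2 * N)
  if j < N then ((j : Int), false) else ((2 * N : Int) - 1 - j, true)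

theorem gvMod_succ (N i : Nat) (hN : 1 ≤ N) :
    (i + 1) % (2 * N) = if i % (2 * N) + 1 = 2 * N then 0 else i % (2 * N) + 1 := by
  have h2 : 1 < 2 * N := by omega
  rw [Nat.add_mod, Nat.mod_eq_of_lt h2]
  have hj : i % (2 * N) < 2 * N := Nat.mod_lt _ (by omega)
  split_ifs with h
  · rw [h, Nat.mod_self]
  · exact Nat.mod_eq_of_lt (by omega)

-- A's per-line state update sends gvState N i to gvState N (i+1)
theorem gvState_step (N i : Nat) (hN : 1 ≤ N) :
    (let ci1 : Int := if (gvState N i).2 = false then (gvState N i).1 + 1 else (gvState N i).1 - 1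
     let st2 : Int × Bool := if ci1 = (N : Int) then ((N : Int) - 1, true) else (ci1, (gvState N i).2)
     if st2.1 = -1 then ((0 : Int), false) else st2) = gvState N (i + 1) := by
  have hj : i % (2 * N) < 2 * N := Nat.mod_lt _ (by omega)
  simp only [gvState, gvMod_succ N i hN]
  generalize i % (2 * N) = j at hj ⊢
  split_ifs <;>
    (try simp only [Prod.mk.injEq, not_lt, Bool.true_eq_false,
      Bool.false_eq_true, and_true, and_false] at *)
  all_goals (first | omega | simp_all)

-- B's closed-form index is the first component of A's next state
theorem gvIdx_eq (N i : Nat) (hN : 1 ≤ N) :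
    max 0 (min (((i % (2 * N) : Nat) : Int) + 1)
      (min ((N : Int) - 1) (2 * (N : Int) - 2 - ((i % (2 * N) : Nat) : Int)))) =
    (gvState N (i + 1)).1 := by
  have hj : i % (2 * N) < 2 * N := Nat.mod_lt _ (by omega)
  simp only [gvState, gvMod_succ N i hN]
  generalize i % (2 * N) = j at hj ⊢
  simp only [max_def, min_def]
  split_ifs <;> push_cast <;> omega

-- loop ↔ enumerated pieces, from any aligned state
theorem gv_loop_eq (colors : List Int) (hc : colors ≠ []) :
    ∀ (lines : List String) (i : Nat) (resp : String),
      gradient_vertical_loop colors lines resp (gvState colors.length i).1 (gvState colors.length i).2 =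
        resp ++ gradient_vertical_alt_go colors i lines := by
  intro lines
  induction lines with
  | nil => intro i resp; simp [gradient_vertical_loop, gradient_vertical_alt_go]
  | cons line rest ih =>
      intro i resp
      have hN : 1 ≤ colors.length := List.length_pos_iff.mpr hc
      have hstep := gvState_step colors.length i hN
      have hidx := gvIdx_eq colors.length i hN
      simp only [gradient_vertical_loop, gradient_vertical_alt_go]
      simp only at hstep
      rw [hstep, ih (i + 1)]
      simp only [gv_piece, ← hidx]
      simp [String.append_assoc]

-- ===== VERDICT (by name: the statement is the Claim_ definition above) =====
theorem gradient_vertical_spec : Claim_equal_gradient_vertical := by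
  intro string colors _ hpre
  unfold Spec_gradient_vertical gradient_vertical gradient_vertical_alt
  have h0 : gvState colors.length 0 = ((0 : Int), false) := by
    have : 0 % (2 * colors.length) = 0 := Nat.zero_mod _
    simp [gvState, this, List.length_pos_iff.mpr hpre]
  have := gv_loop_eq colors hpre ((PySem.Str.split? string "\n").getD []) 0 ""
  rw [h0] at this
  simpa using this
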